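-- pv_equiv track=rewrite | github.com/gsokoll/ubx-protocol-schema | validation/scripts/merge_extracted.py | merge_messages
-- ===== SOURCE A (Python) =====
-- def merge_messages(
--     existing: list[dict],
--     new_messages: list[dict],
-- ) -> tuple[list[dict], int, int]:
--     """
--     Merge new messages into existing dataset.
--
--     Returns (merged_list, added_count, updated_count)
--     """
--     # Build lookup by name
--     existing_by_name = {m["name"]: m for m in existing}
--
--     added = 0
--     updated = 0
--
--     for new_msg in new_messages:
--         name = new_msg["name"]
--         if name in existing_by_name:
--             # Update existing message
--             existing_by_name[name] = new_msg
--             updated += 1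
--         else:
--             # Add new message
--             existing_by_name[name] = new_msg
--             added += 1
--
--     merged = list(existing_by_name.values())
--     return merged, added, updated
-- ===== SOURCE B (Python) =====
-- def merge_messages(existing, new_messages):
--     # Same merge by name; counts come from set arithmetic and the merged
--     # dict from a single overlay pass instead of a compare-and-increment loop.
--     existing_by_name = {m["name"]: m for m in existing}
--     new_names = {m["name"] for m in new_messages}
--     added = len(new_names - existing_by_name.keys())
--     updated = len(new_messages) - added
--     merged = dict(existing_by_name)
--     for m in new_messages:
--         merged[m["name"]] = m
--     return list(merged.values()), added, updated
-- ===== Notes on version B (the rewrite author's own statement) =====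
-- stated objective: simpler
-- what changed: A's single loop threading (dict, added, updated) counters is replaced by a set-difference count of genuinely new names (added = |new names - existing keys|, updated = len(new_messages) - added) plus a plain overlay pass that builds the merged dict without any counters.
-- outside the precondition, e.g. on merge_messages([{}], []): A raises KeyError, B raises KeyError
import Mathlib
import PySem

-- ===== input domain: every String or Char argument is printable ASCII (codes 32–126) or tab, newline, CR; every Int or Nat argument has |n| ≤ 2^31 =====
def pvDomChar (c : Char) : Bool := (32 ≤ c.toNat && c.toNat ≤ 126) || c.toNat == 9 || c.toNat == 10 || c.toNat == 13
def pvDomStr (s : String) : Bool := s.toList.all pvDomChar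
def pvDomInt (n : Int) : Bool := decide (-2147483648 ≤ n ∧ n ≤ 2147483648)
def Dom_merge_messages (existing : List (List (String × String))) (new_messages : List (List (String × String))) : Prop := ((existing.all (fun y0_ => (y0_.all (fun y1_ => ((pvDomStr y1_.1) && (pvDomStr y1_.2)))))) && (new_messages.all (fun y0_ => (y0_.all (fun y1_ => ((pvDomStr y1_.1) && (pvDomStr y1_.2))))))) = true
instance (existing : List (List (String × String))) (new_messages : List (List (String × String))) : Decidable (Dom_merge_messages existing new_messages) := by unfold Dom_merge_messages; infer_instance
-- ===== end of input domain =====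

-- B replaces A's counter-threading loop by a set-difference count plus a counter-free overlay pass (objective: simpler).

-- ===== PORT A =====
-- m["name"] on a message dict (first-match lookup; Pre_ guarantees the key is present)
def pvName (m : List (String × String)) : String := (PySem.Dict.mk m).getD "name" ""

def merge_messages (existing : List (List (String × String))) (new_messages : List (List (String × String))) : (List (List (String × String))) × Int × Int :=
  -- existing_by_name = {m["name"]: m for m in existing}
  let existing_by_name : PySem.Dict String (List (String × String)) :=
    existing.foldl (fun d m => d.insert (pvName m) m) PySem.Dict.empty
  -- for new_msg in new_messages: … threading (dict, added, updated)
  let st :=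
    new_messages.foldl
      (fun (st : PySem.Dict String (List (String × String)) × Int × Int) new_msg =>
        let name := pvName new_msg
        if st.1.contains name then (st.1.insert name new_msg, st.2.1, st.2.2 + 1)
        else (st.1.insert name new_msg, st.2.1 + 1, st.2.2))
      (existing_by_name, 0, 0)
  (st.1.values, st.2.1, st.2.2)

-- ===== PORT B =====
def merge_messages_alt (existing : List (List (String × String))) (new_messages : List (List (String × String))) : (List (List (String × String))) × Int × Int :=
  let existing_by_name : PySem.Dict String (List (String × String)) :=
    existing.foldl (fun d m => d.insert (pvName m) m) PySem.Dict.empty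
  -- new_names = {m["name"] for m in new_messages}
  let new_names : PySem.Set String := PySem.Set.ofList (new_messages.map pvName)
  -- added = len(new_names - existing_by_name.keys())
  let added : Int := ((PySem.Set.diff new_names existing_by_name.keys).length : Int)
  let updated : Int := (new_messages.length : Int) - added
  -- merged = dict(existing_by_name); overlay every new message
  let merged := new_messages.foldl (fun d m => d.insert (pvName m) m) existing_by_name
  (merged.values, added, updated)

-- ===== PRECONDITION & SPEC =====
-- Pre_ excludes exactly the inputs where some message lacks the "name" key, on which A raises KeyError.
def Pre_merge_messages (existing : List (List (String × String))) (new_messages : List (List (String × String))) : Prop :=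
  ((existing.all (fun m => m.any (fun p => p.1 == "name"))) &&
   (new_messages.all (fun m => m.any (fun p => p.1 == "name")))) = true
instance (existing : List (List (String × String))) (new_messages : List (List (String × String))) : Decidable (Pre_merge_messages existing new_messages) := by unfold Pre_merge_messages; infer_instance
def pvWitness_merge_messages : (List (List (String × String))) × (List (List (String × String))) :=
  ([[("name", "A"), ("x", "1")]], [[("name", "A")], [("name", "B")]])

def Spec_merge_messages (existing : List (List (String × String))) (new_messages : List (List (String × String))) (out : (List (List (String × String))) × Int × Int) : Prop := out = merge_messages_alt existing new_messages
instance (existing : List (List (String × String))) (new_messages : List (List (String × String))) (out : (List (List (String × String))) × Int × Int) : Decidable (Spec_merge_messages existing new_messages out) := by unfold Spec_merge_messages; infer_instance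

-- ===== CLAIM (what is proved, stated in full; the proofs are below) =====
def Claim_equal_merge_messages : Prop := ∀ (existing : List (List (String × String))) (new_messages : List (List (String × String))), Dom_merge_messages existing new_messages → Pre_merge_messages existing new_messages → Spec_merge_messages existing new_messages (merge_messages existing new_messages)

-- ===== LEMMAS AND PROOFS =====

-- set difference ignores elements discarded when they are already in t
theorem pv_diff_discard {α : Type} [BEq α] [LawfulBEq α] (s t : List α) (x : α)
    (hx : t.contains x = true) :
    PySem.Set.diff (PySem.Set.discard s x) t = PySem.Set.diff s t := by
  simp only [PySem.Set.diff, PySem.Set.discard, List.filter_filter]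
  refine List.filter_congr ?_
  intro y _
  by_cases h : y = x
  · subst h; simp [List.contains_iff_mem.mp hx]
  · simp [h]

-- diffing against t ++ [x] is diffing the x-discarded set against t
theorem pv_diff_append_singleton {α : Type} [BEq α] [LawfulBEq α] (s t : List α) (x : α) :
    PySem.Set.diff s (t ++ [x]) = PySem.Set.diff (PySem.Set.discard s x) t := by
  simp only [PySem.Set.diff, PySem.Set.discard, List.filter_filter]
  refine List.filter_congr ?_
  intro y _
  by_cases h : y = x
  · subst h; simp
  · simp [h, Bool.and_comm]

-- Set.diff over a cons, by membership of the head in t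
theorem pv_diff_cons_of_mem {α : Type} [BEq α] [LawfulBEq α] (s t : List α) (x : α)
    (hx : x ∈ t) : PySem.Set.diff (x :: s) t = PySem.Set.diff s t := by
  simp [PySem.Set.diff, hx]

theorem pv_diff_cons_of_not_mem {α : Type} [BEq α] [LawfulBEq α] (s t : List α) (x : α)
    (hx : x ∉ t) : PySem.Set.diff (x :: s) t = x :: PySem.Set.diff s t := by
  simp [PySem.Set.diff, hx]

-- A's counting loop, characterised: the dict component is the plain overlay fold and the
-- counters are the set-difference count of fresh names.
theorem pv_loop_eq (msgs : List (List (String × String)))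
    (d : PySem.Dict String (List (String × String))) (a u : Int) :
    msgs.foldl
      (fun (st : PySem.Dict String (List (String × String)) × Int × Int) new_msg =>
        let name := pvName new_msg
        if st.1.contains name then (st.1.insert name new_msg, st.2.1, st.2.2 + 1)
        else (st.1.insert name new_msg, st.2.1 + 1, st.2.2))
      (d, a, u)
    = (msgs.foldl (fun d m => d.insert (pvName m) m) d,
       a + ((PySem.Set.diff (PySem.Set.ofList (msgs.map pvName)) d.keys).length : Int),
       u + ((msgs.length : Int) - ((PySem.Set.diff (PySem.Set.ofList (msgs.map pvName)) d.keys).length : Int))) := by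
  induction msgs generalizing d a u with
  | nil => simp [PySem.Set.ofList, PySem.Set.diff]
  | cons m msgs ih =>
    have hkeys : (PySem.Set.ofList ((m :: msgs).map pvName)) =
        pvName m :: PySem.Set.discard (PySem.Set.ofList (msgs.map pvName)) (pvName m) := by
      simp [PySem.Set.ofList_cons]
    by_cases h : PySem.Dict.contains d (pvName m) = true
    · have hk : (d.keys).contains (pvName m) = true :=
        List.contains_iff_mem.mpr ((PySem.Dict.contains_iff_mem_keys d (pvName m)).mp h)
      have hkeq : (d.insert (pvName m) m).keys = d.keys :=
        PySem.Dict.keys_insert_of_contains d m h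
      simp only [List.foldl_cons, h, if_true, ih]
      have hmem : pvName m ∈ d.keys := List.contains_iff_mem.mp hk
      rw [hkeq, hkeys, pv_diff_cons_of_mem _ _ _ hmem, pv_diff_discard _ _ _ hk]
      simp only [Prod.mk.injEq, List.length_cons]
      refine ⟨by trivial, ?_, ?_⟩ <;> (push_cast; try ring)
    · have hfalse : PySem.Dict.contains d (pvName m) = false := eq_false_of_ne_true h
      have hk : (d.keys).contains (pvName m) = false := by
        cases hc : (d.keys).contains (pvName m)
        · rfl
        · exact absurd ((PySem.Dict.contains_iff_mem_keys d (pvName m)).mpr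
            (List.contains_iff_mem.mp hc)) h
      have hkeq : (d.insert (pvName m) m).keys = d.keys ++ [pvName m] :=
        PySem.Dict.keys_insert_of_not_contains d m hfalse
      simp only [List.foldl_cons, hfalse, Bool.false_eq_true, if_false, ih]
      have hmem : pvName m ∉ d.keys := fun hm => h ((PySem.Dict.contains_iff_mem_keys d (pvName m)).mpr hm)
      rw [hkeq, hkeys, pv_diff_cons_of_not_mem _ _ _ hmem, pv_diff_append_singleton]
      simp only [Prod.mk.injEq, List.length_cons]
      refine ⟨by trivial, ?_, ?_⟩ <;> (push_cast; try ring)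

-- ===== VERDICT (by name: the statement is the Claim_ definition above) =====
theorem merge_messages_spec : Claim_equal_merge_messages := by
  intro existing new_messages _ _
  unfold Spec_merge_messages merge_messages merge_messages_alt
  simp only [pv_loop_eq]
  simp only [Prod.mk.injEq]
  refine ⟨by trivial, by ring, by ring⟩
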